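-- pv_equiv track=rewrite | github.com/lrmoker/Chatbot | model/model.py | check_ngram_repeat
-- ===== SOURCE A (Python) =====
-- def check_ngram_repeat(recent_chars, token, n):
--     """检查n-gram重复"""
--     if len(recent_chars) < n - 1:
--         return False
--
--     # 构建当前n-gram
--     current_gram = recent_chars[-(n-1):] + [token]
--
--     # 检查是否在历史中重复出现
--     for i in range(len(recent_chars) - n + 1):
--         if recent_chars[i:i+n] == current_gram:
--             return True
--     return False
-- ===== SOURCE B (Python) =====
-- def check_ngram_repeat(recent_chars, token, n):
--     """Rabin-Karp: O(1) rolling window hashes from prefix polynomial hashes;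
--     the full window comparison runs only at positions whose hash matches."""
--     L = len(recent_chars)
--     if n < 2 or L < n - 1:
--         return False
--     P = 1000000007
--     B = 131
--
--     def hstr(s):
--         h = 0
--         for c in s:
--             h = (h * 257 + ord(c)) % P
--         return h
--
--     vals = [hstr(s) for s in recent_chars]
--     pre = [0]
--     for v in vals:
--         pre.append((pre[-1] * B + v) % P)
--     pw = 1
--     for _ in range(n):
--         pw = pw * B % P
--     gram = recent_chars[L - n + 1:] + [token]
--     gh = 0
--     for s in gram:
--         gh = (gh * B + hstr(s)) % P
--     for i in range(L - n + 1):
--         if (pre[i + n] - pre[i] * pw) % P == gh and recent_chars[i:i + n] == gram: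
--             return True
--     return False
-- ===== Notes on version B (the rewrite author's own statement) =====
-- stated objective: faster
-- what changed: B is a Rabin-Karp search: it hashes each string once, builds prefix polynomial hashes so every window hash is O(1), and runs the full window comparison only at positions whose rolling hash equals the target gram's hash, instead of A's O(n) slice comparison at every start position.
-- outside the precondition, e.g. on check_ngram_repeat(['b', 'a', 'b', 'b'], 'a', -3): A returns True, B returns False
import Mathlib
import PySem

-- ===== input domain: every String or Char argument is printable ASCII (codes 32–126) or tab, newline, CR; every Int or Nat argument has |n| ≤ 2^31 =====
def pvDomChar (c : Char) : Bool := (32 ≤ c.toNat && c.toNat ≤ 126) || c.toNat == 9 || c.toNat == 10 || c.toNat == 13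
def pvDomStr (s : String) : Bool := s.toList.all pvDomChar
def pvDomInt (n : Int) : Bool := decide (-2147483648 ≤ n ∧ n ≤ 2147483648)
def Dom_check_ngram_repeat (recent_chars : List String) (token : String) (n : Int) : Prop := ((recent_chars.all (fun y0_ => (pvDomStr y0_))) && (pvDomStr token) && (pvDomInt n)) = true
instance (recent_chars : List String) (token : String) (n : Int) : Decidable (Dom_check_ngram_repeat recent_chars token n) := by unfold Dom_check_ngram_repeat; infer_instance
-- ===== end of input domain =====

-- B replaces A's full slice comparison at every start position by a Rabin-Karp search
-- (prefix polynomial hashes, O(1) window hash, verification only at hash hits);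
-- objective: faster.

-- ===== PORT A =====
def check_ngram_repeat (recent_chars : List String) (token : String) (n : Int) : Bool :=
  if (recent_chars.length : Int) < n - 1 then false
  else
    let current_gram := PySem.List.slice recent_chars (some (-(n - 1))) none ++ [token]
    (PySem.List.pyRange 0 ((recent_chars.length : Int) - n + 1) 1).any
      (fun i => PySem.List.slice recent_chars (some i) (some (i + n)) == current_gram)

-- ===== PORT B =====
def pvHP : Int := 1000000007
def pvHB : Int := 131

-- hstr: polynomial hash of the characters of one string (ord(c) = c.toNat)
def pvHStr (s : String) : Int :=
  s.toList.foldl (fun h c => PySem.Int.mod (h * 257 + (c.toNat : Int)) pvHP) 0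

-- the `pre` list built by Source B's append loop (pre[0]=0; pre[j+1]=(pre[j]*B+vals[j])%P)
def pvPreHash (a : Int) : List Int → List Int
  | [] => [a]
  | v :: t => a :: pvPreHash (PySem.Int.mod (a * pvHB + v) pvHP) t

def check_ngram_repeat_alt (recent_chars : List String) (token : String) (n : Int) : Bool :=
  if n < 2 || (recent_chars.length : Int) < n - 1 then false
  else
    let vals := recent_chars.map pvHStr
    let pre := pvPreHash 0 vals
    let pw := (PySem.List.pyRange 0 n 1).foldl (fun p _ => PySem.Int.mod (p * pvHB) pvHP) 1
    let gram := PySem.List.slice recent_chars (some ((recent_chars.length : Int) - n + 1)) none ++ [token]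
    let gh := gram.foldl (fun g s => PySem.Int.mod (g * pvHB + pvHStr s) pvHP) 0
    (PySem.List.pyRange 0 ((recent_chars.length : Int) - n + 1) 1).any
      (fun i =>
        (PySem.Int.mod (PySem.List.pyGetD pre (i + n) 0 - PySem.List.pyGetD pre i 0 * pw) pvHP == gh)
        && (PySem.List.slice recent_chars (some i) (some (i + n)) == gram))

-- ===== PRECONDITION & SPEC =====
-- Pre_ restricts to the natural domain 0 ≤ n of an n-gram size: for negative n the stop index
-- i+n of A's window slice is negative and Python wraps it around from the end of the list, an
-- artefact of slice semantics that can report a "repeat" of a wrong-length gram.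
def Pre_check_ngram_repeat (recent_chars : List String) (token : String) (n : Int) : Prop := 0 ≤ n
instance (recent_chars : List String) (token : String) (n : Int) : Decidable (Pre_check_ngram_repeat recent_chars token n) := by unfold Pre_check_ngram_repeat; infer_instance
def pvWitness_check_ngram_repeat : List String × String × Int := (["a", "b", "a"], "b", 2)

def Spec_check_ngram_repeat (recent_chars : List String) (token : String) (n : Int) (out : Bool) : Prop := out = check_ngram_repeat_alt recent_chars token n
instance (recent_chars : List String) (token : String) (n : Int) (out : Bool) : Decidable (Spec_check_ngram_repeat recent_chars token n out) := by unfold Spec_check_ngram_repeat; infer_instance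

-- ===== CLAIM (what is proved, stated in full; the proofs are below) =====
def Claim_equal_check_ngram_repeat : Prop := ∀ (recent_chars : List String) (token : String) (n : Int), Dom_check_ngram_repeat recent_chars token n → Pre_check_ngram_repeat recent_chars token n → Spec_check_ngram_repeat recent_chars token n (check_ngram_repeat recent_chars token n)

-- ===== LEMMAS AND PROOFS =====

-- the hashing step function, named for the lemmas (definitionally the lambda of the port)
def pvF (h v : Int) : Int := PySem.Int.mod (h * pvHB + v) pvHP

theorem pv_HP_pos : (0 : Int) < pvHP := by norm_num [pvHP]

theorem pv_mod_eq (x : Int) : PySem.Int.mod x pvHP = x % pvHP :=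
  PySem.Int.mod_eq_emod_of_pos pv_HP_pos

theorem pv_emod_modEq (x : Int) : x % pvHP ≡ x [ZMOD pvHP] :=
  Int.emod_emod_of_dvd x dvd_rfl

-- pre[j] is the hash of the first j values
theorem pv_pre_getD (vals : List Int) (a : Int) (j : Nat) (hj : j ≤ vals.length) :
    (pvPreHash a vals).getD j 0 = (vals.take j).foldl pvF a := by
  induction vals generalizing a j with
  | nil =>
    have hj0 : j = 0 := by simpa using hj
    subst hj0
    simp [pvPreHash]
  | cons v t ih =>
    cases j with
    | zero => simp [pvPreHash]
    | succ j =>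
      simp only [pvPreHash, List.getD_cons_succ, List.take_succ_cons, List.foldl_cons]
      exact ih _ j (by simpa using hj)

-- folding the hash over s ++ w: the seed contributes s * B^|w| (mod P)
theorem pv_shift (w : List Int) : ∀ s : Int,
    w.foldl pvF s ≡ s * pvHB ^ w.length + w.foldl pvF 0 [ZMOD pvHP] := by
  induction w with
  | nil => intro s; simp [Int.ModEq]
  | cons x t ih =>
    intro s
    simp only [List.foldl_cons, List.length_cons]
    calc List.foldl pvF (pvF s x) t
        ≡ pvF s x * pvHB ^ t.length + List.foldl pvF 0 t [ZMOD pvHP] := ih _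
      _ ≡ (s * pvHB + x) * pvHB ^ t.length + List.foldl pvF 0 t [ZMOD pvHP] := by
          refine Int.ModEq.add (Int.ModEq.mul_right _ ?_) Int.ModEq.rfl
          simpa [pvF, pv_mod_eq] using pv_emod_modEq (s * pvHB + x)
      _ ≡ s * pvHB ^ (t.length + 1) + (x * pvHB ^ t.length + List.foldl pvF 0 t) [ZMOD pvHP] := by
          have : (s * pvHB + x) * pvHB ^ t.length + List.foldl pvF 0 t
              = s * pvHB ^ (t.length + 1) + (x * pvHB ^ t.length + List.foldl pvF 0 t) := by ring
          rw [this]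
      _ ≡ s * pvHB ^ (t.length + 1) + List.foldl pvF 0 (x :: t) [ZMOD pvHP] := by
          refine Int.ModEq.add Int.ModEq.rfl ?_
          have h2 : pvF 0 x * pvHB ^ t.length ≡ x * pvHB ^ t.length [ZMOD pvHP] := by
            refine Int.ModEq.mul_right _ ?_
            simpa [pvF, pv_mod_eq] using pv_emod_modEq (0 * pvHB + x)
          have h3 : List.foldl pvF 0 (x :: t)
              ≡ x * pvHB ^ t.length + List.foldl pvF 0 t [ZMOD pvHP] := by
            simp only [List.foldl_cons]
            exact (ih _).trans (h2.add_right _)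
          exact h3.symm

-- the pw loop computes B^(length of the range) (mod P)
theorem pv_pw (l : List Int) : ∀ a : Int,
    l.foldl (fun p _ => PySem.Int.mod (p * pvHB) pvHP) a ≡ a * pvHB ^ l.length [ZMOD pvHP] := by
  induction l with
  | nil => intro a; simp [Int.ModEq]
  | cons x t ih =>
    intro a
    simp only [List.foldl_cons, List.length_cons]
    calc List.foldl (fun p _ => PySem.Int.mod (p * pvHB) pvHP) (PySem.Int.mod (a * pvHB) pvHP) t
        ≡ PySem.Int.mod (a * pvHB) pvHP * pvHB ^ t.length [ZMOD pvHP] := ih _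
      _ ≡ a * pvHB * pvHB ^ t.length [ZMOD pvHP] := by
          refine Int.ModEq.mul_right _ ?_
          simpa [pv_mod_eq] using pv_emod_modEq (a * pvHB)
      _ = a * pvHB ^ (t.length + 1) := by ring

-- ===== VERDICT (by name: the statement is the Claim_ definition above) =====
theorem check_ngram_repeat_spec : Claim_equal_check_ngram_repeat := by
  intro rc token n _ hpre
  unfold Pre_check_ngram_repeat at hpre
  unfold Spec_check_ngram_repeat check_ngram_repeat check_ngram_repeat_alt
  by_cases h2 : n < 2
  · -- n = 0 or n = 1 : both sides false
    have hB : (n < 2 || ((rc.length : Int) < n - 1)) = true := by simp; omega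
    rw [if_pos hB]
    have hA : ¬ ((rc.length : Int) < n - 1) := by omega
    rw [if_neg hA]
    interval_cases n
    · -- n = 0
      simp only [List.any_eq_false]
      intro i hi
      rw [PySem.List.mem_pyRange_one] at hi
      have h0 : PySem.List.slice rc (some i) (some (i + 0)) = [] := by
        rw [PySem.List.slice_toNat rc hi.1 (by omega)]
        have e0 : (i + 0).toNat - i.toNat = 0 := by omega
        rw [e0]
        simp
      rw [h0]
      simp
    · -- n = 1
      simp only [List.any_eq_false]
      intro i hi
      rw [PySem.List.mem_pyRange_one] at hi
      have h0 : PySem.List.slice rc (some i) (some (i + 1)) = (rc.drop i.toNat).take 1 := by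
        rw [PySem.List.slice_toNat rc hi.1 (by omega)]
        congr 1
        omega
      have hfrom : PySem.List.slice rc (some (-(1 - 1))) none = rc := by
        norm_num
      rw [h0, hfrom]
      intro hcontra
      rw [beq_iff_eq] at hcontra
      have := congrArg List.length hcontra
      simp at this
      omega
  · -- n ≥ 2
    by_cases hL : (rc.length : Int) < n - 1
    · rw [if_pos hL, if_pos (by simp [hL])]
    · rw [if_neg hL, if_neg (by simp; omega)]
      set L := rc.length with hLdef
      obtain ⟨m, rfl⟩ : ∃ m : Nat, n = (m : Int) := ⟨n.toNat, (Int.toNat_of_nonneg hpre).symm⟩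
      have hm2 : 2 ≤ m := by omega
      have hmL : m - 1 ≤ L := by simp only [hLdef] at hL ⊢; omega
      -- the two grams coincide: both are the (n-1)-suffix of rc, plus token
      have hgram : PySem.List.slice rc (some (-((m : Int) - 1))) none = rc.drop (L - (m - 1)) := by
        have : -((m : Int) - 1) = -(((m - 1 : Nat) : Int)) := by omega
        rw [this, PySem.List.slice_from_neg_natCast rc (m - 1) (by omega)]
      have htail : PySem.List.slice rc (some ((L : Int) - (m : Int) + 1)) none = rc.drop (L - (m - 1)) := by
        have : (L : Int) - (m : Int) + 1 = ((L - (m - 1) : Nat) : Int) := by omega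
        rw [this, PySem.List.slice_from_natCast rc (L - (m - 1))]
      rw [hgram, htail]
      set G := rc.drop (L - (m - 1)) ++ [token] with hG
      have hGlen : G.length = m := by
        simp only [hG, List.length_append, List.length_drop, List.length_singleton]
        omega
      set gh := G.foldl (fun g s => PySem.Int.mod (g * pvHB + pvHStr s) pvHP) 0 with hgh
      -- gh is already reduced mod P
      have hgh_bounds : 0 ≤ gh ∧ gh < pvHP := by
        rw [hgh, hG, List.foldl_append]
        simp only [List.foldl_cons, List.foldl_nil]
        exact ⟨PySem.Int.mod_nonneg _ pv_HP_pos, PySem.Int.mod_lt _ pv_HP_pos⟩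
      -- key: a window equal to G makes the hash test succeed
      have key : ∀ i : Int, 0 ≤ i → i < (L : Int) - (m : Int) + 1 →
          PySem.List.slice rc (some i) (some (i + (m : Int))) = G →
          (PySem.Int.mod
            (PySem.List.pyGetD (pvPreHash 0 (rc.map pvHStr)) (i + (m : Int)) 0 -
              PySem.List.pyGetD (pvPreHash 0 (rc.map pvHStr)) i 0 *
                (PySem.List.pyRange 0 (m : Int) 1).foldl
                  (fun p _ => PySem.Int.mod (p * pvHB) pvHP) 1) pvHP == gh) = true := by
        intro i hi0 hiu hwin
        set k := i.toNat with hk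
        have hik : i = (k : Int) := by omega
        have hkL : k + m ≤ L := by omega
        -- the two pre-values
        have e1 : i + (m : Int) = ((k + m : Nat) : Int) := by omega
        have hp1 : PySem.List.pyGetD (pvPreHash 0 (rc.map pvHStr)) (i + (m : Int)) 0
            = ((rc.map pvHStr).take (k + m)).foldl pvF 0 := by
          rw [e1, PySem.List.pyGetD_natCast]
          exact pv_pre_getD _ 0 (k + m) (by simpa using hkL)
        have hp2 : PySem.List.pyGetD (pvPreHash 0 (rc.map pvHStr)) i 0
            = ((rc.map pvHStr).take k).foldl pvF 0 := by
          rw [hik, PySem.List.pyGetD_natCast]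
          exact pv_pre_getD _ 0 k (by simp only [List.length_map]; omega)
        -- the window of vals is the hash image of G
        have hwindow : ((rc.map pvHStr).drop k).take m = G.map pvHStr := by
          rw [← List.map_drop, ← List.map_take]
          congr 1
          rw [PySem.List.slice_toNat rc (by omega) (by omega)] at hwin
          have : (i + (m : Int)).toNat - i.toNat = m := by omega
          rw [this, hik] at hwin
          simpa using hwin
        -- pre[k+m] ≡ pre[k] * B^m + gh
        have hsplit : ((rc.map pvHStr).take (k + m)).foldl pvF 0
            = (((rc.map pvHStr).take k) ++ (((rc.map pvHStr).drop k).take m)).foldl pvF 0 := by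
          rw [← List.take_add]
        have hfold : (((rc.map pvHStr).drop k).take m).foldl pvF 0 = gh := by
          rw [hwindow, List.foldl_map, hgh]
          rfl
        have hmod1 : ((rc.map pvHStr).take (k + m)).foldl pvF 0
            ≡ ((rc.map pvHStr).take k).foldl pvF 0 * pvHB ^ m + gh [ZMOD pvHP] := by
          rw [hsplit, List.foldl_append]
          have := pv_shift (((rc.map pvHStr).drop k).take m) (((rc.map pvHStr).take k).foldl pvF 0)
          rw [hfold] at this
          have hlen : (((rc.map pvHStr).drop k).take m).length = m := by
            rw [hwindow, List.length_map, hGlen]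
          rwa [hlen] at this
        -- pw ≡ B^m
        have hpw : (PySem.List.pyRange 0 (m : Int) 1).foldl
            (fun p _ => PySem.Int.mod (p * pvHB) pvHP) 1 ≡ pvHB ^ m [ZMOD pvHP] := by
          have := pv_pw (PySem.List.pyRange 0 (m : Int) 1) 1
          rw [PySem.List.length_pyRange_one] at this
          have e : ((m : Int) - 0).toNat = m := by omega
          rw [e] at this
          simpa using this
        -- conclude
        rw [hp1, hp2, pv_mod_eq, beq_iff_eq]
        have hdiff : ((rc.map pvHStr).take (k + m)).foldl pvF 0 -
            ((rc.map pvHStr).take k).foldl pvF 0 *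
              (PySem.List.pyRange 0 (m : Int) 1).foldl
                (fun p _ => PySem.Int.mod (p * pvHB) pvHP) 1 ≡ gh [ZMOD pvHP] := by
          have h1 := hmod1.sub (Int.ModEq.mul_left (((rc.map pvHStr).take k).foldl pvF 0) hpw)
          have e : ((rc.map pvHStr).take k).foldl pvF 0 * pvHB ^ m + gh -
              ((rc.map pvHStr).take k).foldl pvF 0 * pvHB ^ m = gh := by ring
          rwa [e] at h1
        have : _ % pvHP = gh % pvHP := hdiff
        rw [this]
        exact Int.emod_eq_of_lt hgh_bounds.1 hgh_bounds.2
      -- the two `any`s agree pointwise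
      rw [Bool.eq_iff_iff, List.any_eq_true, List.any_eq_true]
      constructor
      · rintro ⟨i, hi, hcond⟩
        rw [PySem.List.mem_pyRange_one] at hi
        refine ⟨i, by rw [PySem.List.mem_pyRange_one]; exact hi, ?_⟩
        rw [beq_iff_eq] at hcond
        rw [key i hi.1 hi.2 hcond, Bool.true_and, beq_iff_eq]
        exact hcond
      · rintro ⟨i, hi, hcond⟩
        simp only [Bool.and_eq_true, beq_iff_eq] at hcond
        exact ⟨i, hi, by rw [beq_iff_eq]; exact hcond.2⟩
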